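-- pv_equiv track=rewrite | github.com/KvaziDeveloper1703/CodeWars_Python | level_3/CW_3_9.py | list_position
-- ===== SOURCE A (Python) =====
-- from collections import Counter
--
-- def list_position(word):
--     letters = list(word)
--     length = len(letters)
--     rank = 1
--     factorials = [1] * (length + 1)
--     for i in range(1, length + 1):
--         factorials[i] = factorials[i - 1] * i
--     for i in range(length):
--         current_letter = letters[i]
--         remaining_letters = Counter(letters[i:])
--         for smaller_letter in sorted(set(remaining_letters)):
--             if smaller_letter < current_letter:
--                 remaining_letters[smaller_letter] -= 1
--                 if remaining_letters[smaller_letter] == 0: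
--                     del remaining_letters[smaller_letter]
--                 total_permutations = factorials[len(letters) - i - 1]
--                 for count in remaining_letters.values():
--                     total_permutations //= factorials[count]
--                 rank += total_permutations
--                 remaining_letters = Counter(letters[i:])
--     return rank
-- ===== SOURCE B (Python) =====
-- def list_position(word):
--     rank = 1
--     counts = {}
--     prod = 1   # product of factorials of the letter counts of the processed suffix
--     fl = 1     # factorial of (current suffix length - 1)
--     L = 0
--     for c in reversed(word):
--         L += 1
--         cc = counts.get(c, 0) + 1
--         counts[c] = cc
--         prod *= cc
--         for d in sorted(counts):
--             if d < c:
--                 rank += fl // (prod // counts[d])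
--         fl *= L
--     return rank
-- ===== Notes on version B (the rewrite author's own statement) =====
-- stated objective: faster
-- what changed: A rebuilds Counter(letters[i:]) from scratch for every position and again after every smaller letter and re-divides by all count factorials; B makes one right-to-left pass maintaining the suffix letter counts, the product of count factorials and the suffix factorial incrementally, so each smaller letter costs one division instead of an O(n) counter rebuild plus a division loop.
import Mathlib
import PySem

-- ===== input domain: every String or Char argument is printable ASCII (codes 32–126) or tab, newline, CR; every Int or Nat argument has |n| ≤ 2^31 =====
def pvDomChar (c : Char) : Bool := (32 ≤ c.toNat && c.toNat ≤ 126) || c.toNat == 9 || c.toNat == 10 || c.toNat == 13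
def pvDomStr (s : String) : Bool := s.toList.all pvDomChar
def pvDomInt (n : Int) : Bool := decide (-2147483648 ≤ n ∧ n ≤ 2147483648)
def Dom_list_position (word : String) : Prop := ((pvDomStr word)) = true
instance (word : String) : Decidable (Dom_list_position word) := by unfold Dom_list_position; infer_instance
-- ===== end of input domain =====

-- B replaces A's per-position Counter rebuilds by one right-to-left pass that maintains the
-- suffix letter counts, the product of count factorials and the suffix factorial incrementally.


-- ===== PORT A =====
-- factorials[i] = factorials[i-1] * i  (index i is 1..length, always in range; IndexError unreachable)
def pvFactStep (f : List Int) (i : Int) : List Int :=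
  f.set i.toNat (PySem.List.pyGetD f (i - 1) 0 * i)

-- body of A's inner 'for smaller_letter in sorted(set(remaining_letters))' loop; state = (remaining_letters, rank);
-- list indexing factorials[...] is always in range (counts ≤ len(letters)), so IndexError is unreachable and pyGetD _ _ 0 is exact
def pvInnerStepA (F : List Int) (suffix : List Char) (current : Char)
    (Li : Int) (st : PySem.Dict Char Int × Int) (d : Char) : PySem.Dict Char Int × Int :=
  if d < current then
    let rem1 := st.1.modify d 0 (fun x => x - 1)
    let rem2 := if rem1.getD d 0 == 0 then rem1.erase d else rem1
    let tp0 := PySem.List.pyGetD F Li 0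
    let tp := rem2.values.foldl (fun t cnt => PySem.Int.floordiv t (PySem.List.pyGetD F cnt 0)) tp0
    (PySem.Dict.counter suffix, st.2 + tp)
  else st

-- body of A's outer 'for i in range(length)' loop (letters[i] is in range: pyGetD _ _ ' ' is exact)
def pvOuterStepA (letters : List Char) (F : List Int) (length : Int) (rank : Int) (i : Int) : Int :=
  let current := PySem.List.pyGetD letters i ' '
  let suffix := PySem.List.slice letters (some i) none
  let remaining := PySem.Dict.counter suffix
  ((PySem.List.sorted (PySem.Set.ofList remaining.keys) (fun x => x) false).foldl
      (pvInnerStepA F suffix current (length - i - 1)) (remaining, rank)).2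

def list_position (word : String) : Int :=
  let letters := word.toList
  let length : Int := (letters.length : Int)
  let factorials := (PySem.List.pyRange 1 (length + 1)).foldl pvFactStep
      (PySem.List.pyRepeat [1] (length + 1))
  (PySem.List.pyRange 0 length).foldl (pvOuterStepA letters factorials length) 1

-- ===== PORT B =====
-- state = (rank, counts, prod, fl, L); counts[d] lookups are on present keys (KeyError unreachable)
def pvStepB (st : Int × PySem.Dict Char Int × Int × Int × Int) (c : Char) :
    Int × PySem.Dict Char Int × Int × Int × Int :=
  let L := st.2.2.2.2 + 1
  let cc := st.2.1.getD c 0 + 1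
  let counts := st.2.1.insert c cc
  let prod := st.2.2.1 * cc
  let fl := st.2.2.2.1
  let rank := (PySem.List.sorted counts.keys (fun x => x) false).foldl
      (fun r d => if d < c then r + PySem.Int.floordiv fl (PySem.Int.floordiv prod (counts.getD d 0)) else r)
      st.1
  (rank, counts, prod, fl * L, L)

def list_position_alt (word : String) : Int :=
  (word.toList.reverse.foldl pvStepB (1, PySem.Dict.empty, 1, 1, 0)).1

-- ===== PRECONDITION & SPEC =====
def Spec_list_position (word : String) (out : Int) : Prop := out = list_position_alt word
instance (word : String) (out : Int) : Decidable (Spec_list_position word out) := by unfold Spec_list_position; infer_instance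

-- ===== CLAIM (what is proved, stated in full; the proofs are below) =====
def Claim_equal_list_position : Prop := ∀ (word : String), Dom_list_position word → Spec_list_position word (list_position word)

-- ===== LEMMAS AND PROOFS =====

-- canonical mathematical description shared by both ports
def pvSD (s : List Char) : List Char := PySem.List.sorted (PySem.Set.ofList s) (fun x => x) false

def pvAdjProd (K : List Char) (s : List Char) (d : Char) : Nat :=
  (K.map (fun e => Nat.factorial (s.count e - if e = d then 1 else 0))).prod

def pvPerm (s : List Char) (d : Char) : Nat :=
  Nat.factorial (s.length - 1) / pvAdjProd (PySem.Set.ofList s) s d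

def pvContribAt (ws : List Char) (i : Nat) : Int :=
  (((pvSD (ws.drop i)).filter (fun d => decide (d < ws.getD i ' '))).map
    (fun d => (pvPerm (ws.drop i) d : Int))).sum

def pvRankSpec (ws : List Char) : Int := 1 + ((List.range ws.length).map (pvContribAt ws)).sum

def pvProdSpec (s : List Char) : Nat :=
  ((PySem.Set.ofList s.reverse).map (fun e => Nat.factorial (s.count e))).prod

-- A's tp value for one smaller letter d, computed from Counter(suffix)
def pvTpA (F : List Int) (s : List Char) (Li : Int) (d : Char) : Int :=
  let rem1 := (PySem.Dict.counter s).modify d 0 (fun x => x - 1)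
  let rem2 := if rem1.getD d 0 == 0 then rem1.erase d else rem1
  rem2.values.foldl (fun t cnt => PySem.Int.floordiv t (PySem.List.pyGetD F cnt 0))
    (PySem.List.pyGetD F Li 0)

-- generic: first-match search is unaffected by dropping non-matching elements
theorem pv_find?_filter {α : Type} (l : List α) (p q : α → Bool)
    (h : ∀ x, p x = true → q x = true) : (l.filter q).find? p = l.find? p := by
  induction l with
  | nil => rfl
  | cons x t ih =>
    by_cases hp : p x = true
    · simp [h x hp, List.find?, hp]
    · simp only [Bool.not_eq_true] at hp
      cases hq : q x <;> simp [hq, List.find?, hp, ih]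

theorem pv_keys_erase {ν : Type} (d : PySem.Dict Char ν) (k : Char) :
    (d.erase k).keys = d.keys.filter (fun x => !(x == k)) := by
  show List.map Prod.fst (List.filter (fun p => !p.1 == k) d.items) = _
  unfold PySem.Dict.keys
  induction d.items with
  | nil => rfl
  | cons x t ih => by_cases h : x.1 == k <;> simp [h, ih]

theorem pv_get?_erase_of_ne {ν : Type} (d : PySem.Dict Char ν) (k k' : Char) (h : k' ≠ k) :
    (d.erase k).get? k' = d.get? k' := by
  simp only [PySem.Dict.erase, PySem.Dict.get?]
  rw [pv_find?_filter]
  intro x hx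
  simp only [beq_iff_eq] at hx ⊢
  simp [hx, h]

-- the factorial-table lookup
theorem pv_table_get (n k : Nat) (hk : k ≤ n) :
    PySem.List.pyGetD ((List.range (n + 1)).map (fun j => ((Nat.factorial j : Nat) : Int))) ((k : Nat) : Int) 0
      = ((Nat.factorial k : Nat) : Int) := by
  rw [PySem.List.pyGetD_natCast, List.getD_eq_getElem _ _ (by simpa using Nat.lt_succ_of_le hk)]
  simp

-- chained Int floor-divisions through the factorial table collapse to one Nat division
theorem pv_fold_divF (n : Nat) (l : List Char) (f : Char → Nat) (hf : ∀ e ∈ l, f e ≤ n) (m : Nat) :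
    l.foldl (fun t e => PySem.Int.floordiv t (PySem.List.pyGetD
        ((List.range (n + 1)).map (fun j => ((Nat.factorial j : Nat) : Int))) ((f e : Nat) : Int) 0))
      ((m : Nat) : Int)
      = ((m / (l.map (fun e => Nat.factorial (f e))).prod : Nat) : Int) := by
  induction l generalizing m with
  | nil => simp
  | cons x t ih =>
    rw [List.foldl_cons, pv_table_get n (f x) (hf x (List.mem_cons_self)), PySem.Int.floordiv_natCast,
        ih (fun e he => hf e (List.mem_cons_of_mem x he)), List.map_cons, List.prod_cons,
        Nat.div_div_eq_div_mul]

-- sorting any nodup key list with the same membership gives the canonical sorted dedup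
theorem pv_sorted_keys (K s : List Char) (hnd : K.Nodup) (hmem : ∀ x, x ∈ K ↔ x ∈ s) :
    PySem.List.sorted K (fun x => x) false = pvSD s := by
  apply PySem.List.sorted_eq_of_perm_of_pairwise_lt
  · refine (List.perm_ext_iff_of_nodup ?_ hnd).2 ?_
    · exact ((PySem.List.sorted_perm _ _ _).nodup_iff).2 (PySem.Set.nodup_ofList s)
    · intro a
      unfold pvSD
      rw [(PySem.List.sorted_perm _ _ _).mem_iff, PySem.Set.mem_ofList, ← hmem]
  · have hle := PySem.List.sorted_pairwise (κ := Char) (PySem.Set.ofList s) (fun x => x)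
    have hnd' : (PySem.List.sorted (PySem.Set.ofList s) (fun x => x) false).Nodup :=
      ((PySem.List.sorted_perm _ _ _).nodup_iff).2 (PySem.Set.nodup_ofList s)
    have := List.Pairwise.and hle hnd'
    exact this.imp (fun h => lt_of_le_of_ne h.1 h.2)

theorem pv_adjProd_perm {K K' : List Char} (h : K.Perm K') (s : List Char) (d : Char) :
    pvAdjProd K s d = pvAdjProd K' s d := (h.map _).prod_eq

-- dividing the product of count factorials by count(d) decrements d's count inside the product
theorem pv_adj_div (K s : List Char) (d : Char) (hnd : K.Nodup) (hdK : d ∈ K) (hc : 1 ≤ s.count d) :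
    (K.map (fun e => Nat.factorial (s.count e))).prod / s.count d = pvAdjProd K s d := by
  have hperm : K.Perm (d :: K.erase d) := List.perm_cons_erase hdK
  have hne : ∀ e ∈ K.erase d, e ≠ d := by
    intro e he
    have : d ∉ K.erase d := hnd.not_mem_erase
    exact fun h => this (h ▸ he)
  have h1 : (K.map (fun e => Nat.factorial (s.count e))).prod
      = Nat.factorial (s.count d) * ((K.erase d).map (fun e => Nat.factorial (s.count e))).prod := by
    rw [(hperm.map _).prod_eq]; simp
  have h2 : pvAdjProd K s d
      = Nat.factorial (s.count d - 1) * ((K.erase d).map (fun e => Nat.factorial (s.count e))).prod := by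
    unfold pvAdjProd
    rw [(hperm.map _).prod_eq]
    simp only [List.map_cons, List.prod_cons]
    congr 1
    refine congrArg List.prod (List.map_congr_left ?_)
    intro e he
    simp [hne e he]
  obtain ⟨m, hm⟩ : ∃ m, s.count d = m + 1 := ⟨s.count d - 1, by omega⟩
  rw [h1, h2, hm, Nat.factorial_succ]
  simp only [Nat.add_sub_cancel]
  rw [mul_assoc, Nat.mul_div_cancel_left _ (Nat.succ_pos m)]


theorem pv_pyRange_one (n : Nat) :
    PySem.List.pyRange 1 ((n : Int) + 1) = (List.range n).map (fun k => (((k + 1 : Nat)) : Int)) := by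
  rw [PySem.List.pyRange_of_pos _ _ Int.one_pos]
  have h1 : ((n : Int) + 1 - 1 + 1 - 1) / 1 = (n : Int) := by omega
  rw [h1]
  by_cases hn : 0 < n
  · rw [if_pos (by omega)]
    rw [Int.toNat_natCast]
    apply List.map_congr_left
    intro k _
    push_cast
    ring
  · have hz : n = 0 := by omega
    subst hz
    rw [if_neg (by norm_num)]
    simp

theorem pv_tableAux (n j : Nat) (hj : j ≤ n) :
    ((List.range j).map (fun k => (((k + 1 : Nat)) : Int))).foldl pvFactStep (List.replicate (n + 1) 1)
      = (List.range (j + 1)).map (fun k => ((Nat.factorial k : Nat) : Int)) ++ List.replicate (n - j) 1 := by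
  induction j with
  | zero =>
    simp [Nat.factorial, List.replicate_succ]
  | succ j ih =>
    rw [List.range_succ, List.map_append, List.foldl_append, ih (by omega)]
    simp only [List.map_cons, List.map_nil, List.foldl_cons, List.foldl_nil]
    unfold pvFactStep
    have hlen : ((List.range (j + 1)).map (fun k => ((Nat.factorial k : Nat) : Int))).length = j + 1 := by
      simp
    have hsub : ((j + 1 : Nat) : Int) - 1 = ((j : Nat) : Int) := by omega
    have hget : PySem.List.pyGetD
        ((List.range (j + 1)).map (fun k => ((Nat.factorial k : Nat) : Int)) ++ List.replicate (n - j) 1)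
        ((j : Nat) : Int) 0 = ((Nat.factorial j : Nat) : Int) := by
      rw [PySem.List.pyGetD_natCast,
          List.getD_eq_getElem _ _ (by simp; omega),
          List.getElem_append_left (by omega)]
      simp
    rw [hsub, hget, show (((j + 1 : Nat)) : Int).toNat = j + 1 from by omega,
        List.set_append, if_neg (by rw [hlen]; omega), hlen]
    have hrep : List.replicate (n - j) (1 : Int) = 1 :: List.replicate (n - (j + 1)) 1 := by
      have : n - j = (n - (j + 1)) + 1 := by omega
      rw [this, List.replicate_succ]
    rw [hrep]
    simp only [Nat.sub_self, List.set_cons_zero]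
    rw [List.range_succ (n := j + 1), List.map_append, List.append_assoc]
    simp only [List.map_cons, List.map_nil]
    congr 2
    rw [Nat.factorial_succ]
    push_cast
    ring

theorem pv_tableA (n : Nat) :
    (PySem.List.pyRange 1 ((n : Int) + 1)).foldl pvFactStep (PySem.List.pyRepeat [1] ((n : Int) + 1))
      = (List.range (n + 1)).map (fun k => ((Nat.factorial k : Nat) : Int)) := by
  rw [pv_pyRange_one, PySem.List.pyRepeat_singleton,
      show ((n : Int) + 1).toNat = n + 1 from by omega,
      pv_tableAux n n le_rfl]
  simp

-- A's inner loop: the dict component is reset to Counter(suffix) on every hit, so it is invariant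
theorem pv_innerA (F : List Int) (s : List Char) (c : Char) (Li : Int) (ds : List Char) (r : Int) :
    ds.foldl (pvInnerStepA F s c Li) (PySem.Dict.counter s, r)
      = (PySem.Dict.counter s, r + ((ds.filter (fun d => decide (d < c))).map (pvTpA F s Li)).sum) := by
  induction ds generalizing r with
  | nil => simp
  | cons d t ih =>
    rw [List.foldl_cons]
    by_cases h : d < c
    · have hstep : pvInnerStepA F s c Li (PySem.Dict.counter s, r) d
          = (PySem.Dict.counter s, r + pvTpA F s Li d) := by
        simp [pvInnerStepA, pvTpA, h]
      rw [hstep, ih, List.filter_cons]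
      simp [h, add_assoc]
    · have hstep : pvInnerStepA F s c Li (PySem.Dict.counter s, r) d = (PySem.Dict.counter s, r) := by
        simp [pvInnerStepA, h]
      rw [hstep, ih, List.filter_cons]
      simp [h]

-- A's tp for one smaller letter equals the canonical multinomial value
theorem pv_tpA (n : Nat) (s : List Char) (d : Char) (hd : d ∈ s) (hs : s.length ≤ n)
    (Li : Int) (hLi : Li = (s.length : Int) - 1) :
    pvTpA ((List.range (n + 1)).map (fun k => ((Nat.factorial k : Nat) : Int))) s Li d
      = ((pvPerm s d : Nat) : Int) := by
  have hlen1 : 1 ≤ s.length := List.length_pos_of_mem hd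
  have hcnt1 : 1 ≤ s.count d := List.count_pos_iff.2 hd
  have hLi' : Li = (((s.length - 1 : Nat)) : Int) := by rw [hLi]; omega
  unfold pvTpA
  simp only []
  set F := (List.range (n + 1)).map (fun k => ((Nat.factorial k : Nat) : Int)) with hF
  have htp0 : PySem.List.pyGetD F Li 0 = ((Nat.factorial (s.length - 1) : Nat) : Int) := by
    rw [hLi', hF, pv_table_get n (s.length - 1) (by omega)]
  set rem1 := (PySem.Dict.counter s).modify d 0 (fun x => x - 1) with hrem1
  have hcontains : (PySem.Dict.counter s).contains d = true := by
    rw [PySem.Dict.contains_counter]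
    simpa using hd
  have hkeys1 : rem1.keys = PySem.Set.ofList s := by
    rw [hrem1, PySem.Dict.keys_modify, PySem.Dict.keys_insert_of_contains _ _ hcontains,
        PySem.Dict.keys_counter]
  have hnd1 : rem1.keys.Nodup := by rw [hkeys1]; exact PySem.Set.nodup_ofList s
  have hgetD1 : ∀ e : Char, rem1.getD e 0
      = if e = d then ((s.count d : Nat) : Int) - 1 else ((s.count e : Nat) : Int) := by
    intro e
    rw [hrem1, PySem.Dict.getD_modify, PySem.Dict.getD_counter, PySem.Dict.getD_counter]
  rw [htp0]
  have hbound : ∀ e ∈ s, s.count e ≤ n := fun e _ => le_trans List.count_le_length hs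
  by_cases hone : s.count d = 1
  · -- the count of d drops to 0, so A deletes the key; its factor would be 0! = 1
    have hcond : (rem1.getD d 0 == 0) = true := by
      rw [hgetD1 d, if_pos rfl, hone]
      simp
    rw [if_pos hcond]
    have hkeys2 : (rem1.erase d).keys = (PySem.Set.ofList s).filter (fun x => !(x == d)) := by
      rw [pv_keys_erase, hkeys1]
    have hnd2 : (rem1.erase d).keys.Nodup := by
      rw [hkeys2]
      exact (PySem.Set.nodup_ofList s).filter _
    rw [PySem.Dict.values_eq_map_keys _ hnd2 0, hkeys2, List.foldl_map]
    refine Eq.trans (PySem.List.foldl_congr_mem _ _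
        (fun t e => PySem.Int.floordiv t (PySem.List.pyGetD
          ((List.range (n + 1)).map (fun j => ((Nat.factorial j : Nat) : Int)))
          (((s.count e - if e = d then 1 else 0 : Nat)) : Int) 0)) _ ?_) ?_
    · intro acc e he
      obtain ⟨heK, hbe⟩ := List.mem_filter.1 he
      have hne' : e ≠ d := by simpa using hbe
      have hes : e ∈ s := (PySem.Set.mem_ofList s e).1 heK
      have hgd2 : (rem1.erase d).getD e 0 = ((s.count e : Nat) : Int) := by
        rw [PySem.Dict.getD_eq_get?_getD, pv_get?_erase_of_ne _ _ _ hne',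
            ← PySem.Dict.getD_eq_get?_getD, hgetD1 e, if_neg hne']
      rw [hgd2, hF]
      simp [hne']
    · rw [← hF, pv_fold_divF n _ _ (fun e he => le_trans (Nat.sub_le _ _)
          (hbound e ((PySem.Set.mem_ofList s e).1 (List.mem_filter.1 he).1)))]
      congr 1
      unfold pvPerm
      congr 1
      unfold pvAdjProd
      have hperm : (PySem.Set.ofList s).Perm (d :: (PySem.Set.ofList s).erase d) :=
        List.perm_cons_erase ((PySem.Set.mem_ofList s d).2 hd)
      rw [((hperm.map _).prod_eq : _), List.Nodup.erase_eq_filter (PySem.Set.nodup_ofList s) d]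
      simp [hone, bne]
  · -- the count of d stays positive, the key set is unchanged
    have hcnt2 : 2 ≤ s.count d := by omega
    have hcond : (rem1.getD d 0 == 0) = false := by
      rw [hgetD1 d, if_pos rfl]
      simp only [beq_eq_false_iff_ne, ne_eq]
      intro hzero
      omega
    rw [if_neg (by simp [hcond])]
    rw [PySem.Dict.values_eq_map_keys _ hnd1 0, hkeys1, List.foldl_map]
    refine Eq.trans (PySem.List.foldl_congr_mem _ _
        (fun t e => PySem.Int.floordiv t (PySem.List.pyGetD
          ((List.range (n + 1)).map (fun j => ((Nat.factorial j : Nat) : Int)))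
          (((s.count e - if e = d then 1 else 0 : Nat)) : Int) 0)) _ ?_) ?_
    · intro acc e he
      have hes : e ∈ s := (PySem.Set.mem_ofList s e).1 he
      have hval : rem1.getD e 0 = (((s.count e - if e = d then 1 else 0 : Nat)) : Int) := by
        rw [hgetD1 e]
        by_cases hed : e = d
        · subst hed
          simp
          omega
        · rw [if_neg hed, if_neg hed, Nat.sub_zero]
      rw [hval, hF]
    · rw [← hF, pv_fold_divF n _ _ (fun e he => le_trans (Nat.sub_le _ _)
          (hbound e ((PySem.Set.mem_ofList s e).1 he)))]
      rfl

theorem pv_A_eq (word : String) : list_position word = pvRankSpec word.toList := by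
  simp only [list_position]
  rw [pv_tableA word.toList.length, PySem.List.pyRange_zero_natCast, List.foldl_map]
  refine Eq.trans (PySem.List.foldl_congr_mem _ _ (fun acc i => acc + pvContribAt word.toList i) _ ?_) ?_
  · intro acc i hi
    have hin : i < word.toList.length := List.mem_range.1 hi
    unfold pvOuterStepA
    simp only []
    rw [PySem.List.pyGetD_natCast, PySem.List.slice_from _ (Int.natCast_nonneg i),
        Int.toNat_natCast, PySem.Dict.keys_counter,
        pv_sorted_keys (PySem.Set.ofList (PySem.Set.ofList (word.toList.drop i)))
          (word.toList.drop i) (PySem.Set.nodup_ofList _)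
          (by intro x; rw [PySem.Set.mem_ofList, PySem.Set.mem_ofList]),
        pv_innerA]
    show acc + _ = acc + pvContribAt word.toList i
    congr 1
    unfold pvContribAt
    apply congrArg List.sum
    apply List.map_congr_left
    intro d hdm
    have hd : d ∈ word.toList.drop i := by
      have h1 := (List.mem_filter.1 hdm).1
      have h2 := (PySem.List.sorted_perm (PySem.Set.ofList (word.toList.drop i))
        (fun x => x) false).subset h1
      rwa [PySem.Set.mem_ofList] at h2
    exact pv_tpA word.toList.length _ d hd (by rw [List.length_drop]; omega) _
      (by rw [List.length_drop]; omega)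
  · rw [PySem.List.foldl_add]
    unfold pvRankSpec
    rfl

theorem pv_contribAt_succ (c : Char) (t : List Char) (j : Nat) :
    pvContribAt (c :: t) (j + 1) = pvContribAt t j := rfl

theorem pv_rankSpec_cons (c : Char) (t : List Char) :
    pvRankSpec (c :: t) = pvRankSpec t + pvContribAt (c :: t) 0 := by
  unfold pvRankSpec
  rw [List.length_cons, List.range_succ_eq_map, List.map_cons, List.map_map]
  have : (pvContribAt (c :: t)) ∘ Nat.succ = pvContribAt t := by
    funext j; exact pv_contribAt_succ c t j
  rw [this, List.sum_cons]
  ring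

theorem pv_ofList_perm (xs ys : List Char) (h : ∀ x, x ∈ xs ↔ x ∈ ys) :
    (PySem.Set.ofList xs).Perm (PySem.Set.ofList ys) := by
  refine (List.perm_ext_iff_of_nodup (PySem.Set.nodup_ofList xs) (PySem.Set.nodup_ofList ys)).2 ?_
  intro a
  rw [PySem.Set.mem_ofList, PySem.Set.mem_ofList]
  exact h a

theorem pv_prodSpec_cons (c : Char) (t : List Char) :
    pvProdSpec (c :: t) = pvProdSpec t * (t.count c + 1) := by
  unfold pvProdSpec
  have hcnt : ∀ e, (c :: t).count e = t.count e + if e = c then 1 else 0 := by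
    intro e; rw [List.count_cons]; by_cases h : e = c <;> simp [h, Ne.symm]
  by_cases hc : c ∈ t
  · -- key set unchanged; the factor at c grows from (count)! to (count+1)!
    have hK : (PySem.Set.ofList ((c :: t).reverse)).Perm (PySem.Set.ofList t.reverse) := by
      apply pv_ofList_perm
      intro x
      simp only [List.mem_reverse, List.mem_cons]
      constructor
      · rintro (rfl | hx); exact hc; exact hx
      · exact Or.inr
    rw [((hK.map _).prod_eq : _)]
    set K := PySem.Set.ofList t.reverse with hKdef
    have hcK : c ∈ K := by rw [hKdef, PySem.Set.mem_ofList, List.mem_reverse]; exact hc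
    have hndK : K.Nodup := PySem.Set.nodup_ofList _
    have hperm : K.Perm (c :: K.erase c) := List.perm_cons_erase hcK
    have hne : ∀ e ∈ K.erase c, e ≠ c := by
      intro e he heq
      subst heq
      exact hndK.not_mem_erase he
    rw [((hperm.map (fun e => Nat.factorial ((c :: t).count e))).prod_eq : _),
        ((hperm.map (fun e => Nat.factorial (t.count e))).prod_eq : _)]
    simp only [List.map_cons, List.prod_cons]
    have hrest : (K.erase c).map (fun e => Nat.factorial ((c :: t).count e))
        = (K.erase c).map (fun e => Nat.factorial (t.count e)) := by
      apply List.map_congr_left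
      intro e he
      rw [hcnt e, if_neg (hne e he)]
      simp
    rw [hrest, hcnt c, if_pos rfl, Nat.factorial_succ]
    ring
  · -- c is a fresh key; its factor is 1! = 1
    have hK : (PySem.Set.ofList ((c :: t).reverse)).Perm (PySem.Set.ofList t.reverse ++ [c]) := by
      refine (List.perm_ext_iff_of_nodup (PySem.Set.nodup_ofList _) ?_).2 ?_
      · refine List.Nodup.append (PySem.Set.nodup_ofList _) (List.nodup_singleton c) ?_
        intro x hx hx'
        rw [List.mem_singleton] at hx'
        rw [PySem.Set.mem_ofList, List.mem_reverse] at hx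
        exact hc (hx' ▸ hx)
      · intro a
        simp [PySem.Set.mem_ofList, List.mem_reverse, or_comm]
    rw [((hK.map _).prod_eq : _)]
    rw [List.map_append, List.prod_append]
    simp only [List.map_cons, List.map_nil, List.prod_cons, List.prod_nil]
    have hcc : (c :: t).count c = 1 := by
      rw [hcnt c, if_pos rfl, List.count_eq_zero_of_not_mem hc]
    have hrest : (PySem.Set.ofList t.reverse).map (fun e => Nat.factorial ((c :: t).count e))
        = (PySem.Set.ofList t.reverse).map (fun e => Nat.factorial (t.count e)) := by
      apply List.map_congr_left
      intro e he
      rw [PySem.Set.mem_ofList, List.mem_reverse] at he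
      rw [hcnt e, if_neg (fun heq => hc (by rwa [heq] at he))]
      simp
    rw [hcc, hrest]
    simp [List.count_eq_zero_of_not_mem hc]

theorem pv_divB (s : List Char) (d : Char) (hd : d ∈ s) :
    PySem.Int.floordiv ((Nat.factorial (s.length - 1) : Nat) : Int)
      (PySem.Int.floordiv ((pvProdSpec s : Nat) : Int) ((s.count d : Nat) : Int))
      = ((pvPerm s d : Nat) : Int) := by
  rw [PySem.Int.floordiv_natCast, PySem.Int.floordiv_natCast]
  congr 1
  unfold pvProdSpec
  rw [pv_adj_div (PySem.Set.ofList s.reverse) s d (PySem.Set.nodup_ofList _)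
      (by rw [PySem.Set.mem_ofList, List.mem_reverse]; exact hd)
      (List.count_pos_iff.2 hd)]
  unfold pvPerm
  rw [pv_adjProd_perm (pv_ofList_perm s.reverse s (by intro x; rw [List.mem_reverse]))]

theorem pv_B_inv (s : List Char) :
    s.reverse.foldl pvStepB (1, PySem.Dict.empty, 1, 1, 0)
      = (pvRankSpec s, PySem.Dict.counter s.reverse, ((pvProdSpec s : Nat) : Int),
         ((Nat.factorial s.length : Nat) : Int), (s.length : Int)) := by
  induction s with
  | nil =>
    simp [pvRankSpec, PySem.Dict.counter, pvProdSpec, PySem.Set.ofList, PySem.Set.empty]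
  | cons c t ih =>
    rw [List.reverse_cons, List.foldl_append, ih, List.foldl_cons, List.foldl_nil]
    unfold pvStepB
    simp only []
    have hgetDc : (PySem.Dict.counter t.reverse).getD c 0 = ((t.count c : Nat) : Int) := by
      rw [PySem.Dict.getD_counter, List.count_reverse]
    have hcnts : (PySem.Dict.counter t.reverse).insert c ((PySem.Dict.counter t.reverse).getD c 0 + 1)
        = PySem.Dict.counter (t.reverse ++ [c]) := by
      rw [PySem.Dict.counter_append_singleton]
      rfl
    simp only [Prod.mk.injEq]
    refine ⟨?_, by rw [hcnts], ?_, ?_, by simp⟩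
    · -- rank component
      rw [hcnts, PySem.Dict.keys_counter,
          pv_sorted_keys _ (c :: t) (PySem.Set.nodup_ofList _)
            (by intro x; rw [PySem.Set.mem_ofList]; simp [or_comm])]
      rw [PySem.List.foldl_ite_eq_foldl_filter (p := fun d => d < c)
        (f := fun r d => r + PySem.Int.floordiv ((Nat.factorial t.length : Nat) : Int)
          (PySem.Int.floordiv (((pvProdSpec t : Nat) : Int) * ((PySem.Dict.counter t.reverse).getD c 0 + 1))
            ((PySem.Dict.counter (t.reverse ++ [c])).getD d 0)))]
      rw [PySem.List.foldl_add]
      rw [pv_rankSpec_cons]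
      congr 1
      unfold pvContribAt
      simp only [List.drop_zero, List.getD_cons_zero]
      apply congrArg List.sum
      apply List.map_congr_left
      intro d hdmem
      have hd : d ∈ (c :: t) := by
        have := (List.mem_filter.1 hdmem).1
        have := (PySem.List.sorted_perm (PySem.Set.ofList (c :: t)) (fun x => x) false).subset
          (by exact (List.mem_filter.1 hdmem).1)
        rwa [PySem.Set.mem_ofList] at this
      have hgdd : (PySem.Dict.counter (t.reverse ++ [c])).getD d 0 = (((c :: t).count d : Nat) : Int) := by
        rw [PySem.Dict.getD_counter]
        congr 1
        rw [List.count_append, List.count_reverse]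
        by_cases h : d = c <;> simp [List.count_cons, h]
      rw [hgdd, hgetDc]
      have hprod : ((pvProdSpec t : Nat) : Int) * (((t.count c : Nat) : Int) + 1)
          = ((pvProdSpec (c :: t) : Nat) : Int) := by
        rw [pv_prodSpec_cons]; push_cast; ring
      rw [hprod]

      have hlen : t.length = (c :: t).length - 1 := rfl
      rw [hlen, pv_divB (c :: t) d hd]
    · -- prod component
      rw [hgetDc]
      rw [pv_prodSpec_cons]; push_cast; ring
    · -- fl component
      rw [List.length_cons, Nat.factorial_succ]; push_cast; ring

theorem pv_B_eq (word : String) : list_position_alt word = pvRankSpec word.toList := by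
  unfold list_position_alt
  rw [pv_B_inv]

-- ===== VERDICT (by name: the statement is the Claim_ definition above) =====
theorem list_position_spec : Claim_equal_list_position := by
  intro word _
  unfold Spec_list_position
  rw [pv_A_eq, pv_B_eq]
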